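-- pv_equiv track=rewrite | github.com/ajay-gandhi/autorotate | rotateUtils.py | find_parallel_lines
-- ===== SOURCE A (Python) =====
-- def find_parallel_lines(lines):
--     parallel_pairs = []
--
--     for i in range(len(lines)):
--         for j in range(i, len(lines)):
--             if (i == j): continue
--             if (abs(lines[i][1] - lines[j][1]) == 0):
--                 parallel_pairs.append((i, j))
--
--     return parallel_pairs
-- ===== SOURCE B (Python) =====
-- def find_parallel_lines(lines):
--     groups = {}
--     for k, line in enumerate(lines):
--         groups.setdefault(line[1], []).append(k)
--     pairs = []
--     for i, line in enumerate(lines):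
--         for j in groups[line[1]]:
--             if j > i:
--                 pairs.append((i, j))
--     return pairs
-- ===== Notes on version B (the rewrite author's own statement) =====
-- stated objective: faster
-- what changed: Replaces the scan-every-pair nested index loop with a one-pass dict grouping each angle to its ascending index list, then emits pairs (i,j) by scanning only i's own angle group, which yields the same lexicographic order without sorting.
import Mathlib
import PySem

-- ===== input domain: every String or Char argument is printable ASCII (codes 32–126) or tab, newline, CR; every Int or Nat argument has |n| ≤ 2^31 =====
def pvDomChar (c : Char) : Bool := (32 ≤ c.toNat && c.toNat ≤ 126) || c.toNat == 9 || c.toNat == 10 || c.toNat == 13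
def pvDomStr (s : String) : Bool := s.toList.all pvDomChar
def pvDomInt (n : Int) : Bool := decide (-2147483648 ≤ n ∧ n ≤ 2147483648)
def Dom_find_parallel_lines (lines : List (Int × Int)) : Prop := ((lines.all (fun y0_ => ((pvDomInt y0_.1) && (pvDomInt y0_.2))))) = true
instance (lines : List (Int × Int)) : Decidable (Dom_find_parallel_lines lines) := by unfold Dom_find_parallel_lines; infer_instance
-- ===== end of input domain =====

-- B groups indices by angle in one dict pass, then emits each index's pairs from its own
-- angle group only (faster: no scan over all j for every i); return value proved equal to A's.

-- ===== PORT A =====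
def find_parallel_lines (lines : List (Int × Int)) : List (Int × Int) :=
  (PySem.List.pyRange 0 lines.length 1).foldl (fun acc i =>
    (PySem.List.pyRange i lines.length 1).foldl (fun acc2 j =>
      if i == j then acc2
      else if ((PySem.List.pyGetD lines i (0, 0)).2 - (PySem.List.pyGetD lines j (0, 0)).2).natAbs == 0
        then acc2 ++ [(i, j)]
        else acc2) acc) []

-- ===== PORT B =====
def find_parallel_lines_alt (lines : List (Int × Int)) : List (Int × Int) :=
  let groups : PySem.Dict Int (List Int) :=
    (PySem.List.enumerate lines 0).foldl
      (fun d p => d.modify p.2.2 [] (fun v => v ++ [p.1])) PySem.Dict.empty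
  (PySem.List.enumerate lines 0).foldl (fun acc p =>
    (groups.getD p.2.2 []).foldl
      (fun acc2 j => if j > p.1 then acc2 ++ [(p.1, j)] else acc2) acc) []

-- ===== PRECONDITION & SPEC =====
def Spec_find_parallel_lines (lines : List (Int × Int)) (out : List (Int × Int)) : Prop := out = find_parallel_lines_alt lines
instance (lines : List (Int × Int)) (out : List (Int × Int)) : Decidable (Spec_find_parallel_lines lines out) := by unfold Spec_find_parallel_lines; infer_instance

-- ===== CLAIM (what is proved, stated in full; the proofs are below) =====
def Claim_equal_find_parallel_lines : Prop := ∀ (lines : List (Int × Int)), Dom_find_parallel_lines lines → Spec_find_parallel_lines lines (find_parallel_lines lines)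

-- ===== LEMMAS AND PROOFS =====

-- the angle of line j (the loops only produce in-range indices, so the default is never used)
def pvAng (lines : List (Int × Int)) (j : Int) : Int := (PySem.List.pyGetD lines j (0, 0)).2

-- the common canonical value: for each i, its partners j > i with equal angle, in order
def pvCanon (lines : List (Int × Int)) : List (Int × Int) :=
  (PySem.List.pyRange 0 lines.length 1).flatMap (fun i =>
    ((PySem.List.pyRange (i + 1) lines.length 1).filter
        (fun j => pvAng lines j == pvAng lines i)).map (fun j => (i, j)))

-- group dict lookup: folding 'd.modify (f x) [] (· ++ [g x])' appends, per key, the g-images in order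
theorem pv_getD_foldl_modify_append {β : Type} (f : β → Int) (g : β → Int) (l : List β)
    (d : PySem.Dict Int (List Int)) (a : Int) :
    (l.foldl (fun d x => d.modify (f x) [] (fun v => v ++ [g x])) d).getD a []
      = d.getD a [] ++ (l.filter (fun x => f x == a)).map g := by
  induction l generalizing d with
  | nil => simp
  | cons x t ih =>
    simp only [List.foldl_cons, List.filter_cons]
    by_cases h : f x = a
    · subst h
      simp [ih, PySem.Dict.getD_modify_self]
    · rw [ih]
      rw [PySem.Dict.getD_modify_of_ne _ _ _ (Ne.symm h)]
      simp [h]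

theorem pv_A_eq_canon (lines : List (Int × Int)) :
    find_parallel_lines lines = pvCanon lines := by
  unfold find_parallel_lines pvCanon
  have hout : ∀ (acc : List (Int × Int)) (i : Int),
      (PySem.List.pyRange i lines.length 1).foldl (fun acc2 j =>
        if i == j then acc2
        else if ((PySem.List.pyGetD lines i (0, 0)).2 - (PySem.List.pyGetD lines j (0, 0)).2).natAbs == 0
          then acc2 ++ [(i, j)] else acc2) acc
      = acc ++ ((PySem.List.pyRange (i + 1) lines.length 1).filter
          (fun j => pvAng lines j == pvAng lines i)).map (fun j => (i, j)) := by
    intro acc i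
    have hbody : ∀ (acc2 : List (Int × Int)) (j : Int),
        (if i == j then acc2
         else if ((PySem.List.pyGetD lines i (0, 0)).2 - (PySem.List.pyGetD lines j (0, 0)).2).natAbs == 0
           then acc2 ++ [(i, j)] else acc2)
        = (if (¬ i = j) ∧ pvAng lines j = pvAng lines i then acc2 ++ [(i, j)] else acc2) := by
      intro acc2 j
      by_cases h1 : i = j
      · simp [h1]
      · by_cases h2 : pvAng lines j = pvAng lines i
        · have h3 : ((PySem.List.pyGetD lines i (0, 0)).2
              - (PySem.List.pyGetD lines j (0, 0)).2).natAbs = 0 := by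
            simp only [pvAng] at h2
            simp [h2]
          simp [h1, h2, h3]
        · have h3 : ¬ ((PySem.List.pyGetD lines i (0, 0)).2
              - (PySem.List.pyGetD lines j (0, 0)).2).natAbs = 0 := by
            simp only [pvAng] at h2
            simp only [Int.natAbs_eq_zero, sub_eq_zero]
            exact fun h => h2 h.symm
          simp [h1, h2, h3]
    rw [PySem.List.foldl_congr_mem _ _
        (fun acc2 j => if (¬ i = j) ∧ pvAng lines j = pvAng lines i then acc2 ++ [(i, j)] else acc2) acc
        (fun acc2 j _ => hbody acc2 j)]
    by_cases hi : i < (lines.length : Int)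
    · rw [PySem.List.pyRange_one_cons hi]
      simp only [List.foldl_cons, not_true, false_and, if_false]
      rw [PySem.List.foldl_append_ite]
      refine congrArg _ (congrArg _ (List.filter_congr ?_))
      intro j hj
      have hmem := (PySem.List.mem_pyRange_one).1 hj
      have hne : ¬ i = j := by omega
      simp [hne, beq_eq_decide]
    · rw [PySem.List.pyRange_one_eq_nil (by omega), PySem.List.pyRange_one_eq_nil (by omega)]
      simp
  rw [PySem.List.foldl_congr_mem _ _
      (fun acc i => acc ++ ((PySem.List.pyRange (i + 1) lines.length 1).filter
          (fun j => pvAng lines j == pvAng lines i)).map (fun j => (i, j))) []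
      (fun acc i _ => hout acc i)]
  rw [PySem.List.foldl_append_eq_flatMap, List.nil_append]

-- the inner loop of B over the angle group of a valid index i
theorem pv_inner (lines : List (Int × Int)) (i : Int) (h0 : 0 ≤ i) (hn : i < (lines.length : Int))
    (acc : List (Int × Int)) :
    ((PySem.List.pyRange 0 lines.length 1).filter
        (fun j => pvAng lines j == pvAng lines i)).foldl
      (fun acc2 j => if j > i then acc2 ++ [(i, j)] else acc2) acc
    = acc ++ ((PySem.List.pyRange (i + 1) lines.length 1).filter
        (fun j => pvAng lines j == pvAng lines i)).map (fun j => (i, j)) := by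
  rw [PySem.List.foldl_append_ite]
  congr 1
  rw [List.filter_filter]
  rw [PySem.List.pyRange_one_append 0 (i + 1) lines.length (by omega) (by omega),
      List.filter_append]
  have h1 : (PySem.List.pyRange 0 (i + 1) 1).filter
      (fun j => decide (j > i) && (pvAng lines j == pvAng lines i)) = [] := by
    apply List.filter_eq_nil_iff.2
    intro j hj
    have := (PySem.List.mem_pyRange_one).1 hj
    simp only [gt_iff_lt, Bool.and_eq_true, decide_eq_true_eq, not_and]
    omega
  rw [h1, List.nil_append]
  refine congrArg _ (List.filter_congr ?_)
  intro j hj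
  have hlt := (PySem.List.mem_pyRange_one).1 hj
  simp [show i < j by omega]

theorem pv_B_eq_canon (lines : List (Int × Int)) :
    find_parallel_lines_alt lines = pvCanon lines := by
  simp only [find_parallel_lines_alt, pvCanon]
  have hgroups : ∀ a : Int,
      ((PySem.List.enumerate lines 0).foldl
        (fun d p => d.modify p.2.2 [] (fun v => v ++ [p.1])) PySem.Dict.empty).getD a []
      = (PySem.List.pyRange 0 lines.length 1).filter (fun j => pvAng lines j == a) := by
    intro a
    have h := pv_getD_foldl_modify_append (fun p : Int × Int × Int => p.2.2)
      (fun p : Int × Int × Int => p.1) (PySem.List.enumerate lines 0) PySem.Dict.empty a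
    simp only at h
    rw [h, PySem.List.enumerate_eq_map_pyRange lines (0, 0)]
    simp [List.filter_map, List.map_map, Function.comp_def, pvAng]
  refine Eq.trans (PySem.List.foldl_congr_mem _ _
      (fun acc (p : Int × Int × Int) => acc ++
        ((PySem.List.pyRange (p.1 + 1) lines.length 1).filter
          (fun j => pvAng lines j == pvAng lines p.1)).map (fun j => (p.1, j))) [] ?_) ?_
  · intro acc p hp
    obtain ⟨k, hk, rfl⟩ := (PySem.List.mem_enumerate_iff _ _ _).1 hp
    have hang : ((0 : Int) + (k : Int), lines[k]).2.2 = pvAng lines ((0 : Int) + (k : Int), lines[k]).1 := by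
      simp [pvAng, PySem.List.pyGetD_natCast, List.getD_eq_getElem?_getD, hk]
    rw [hang, hgroups]
    exact pv_inner lines _ (by positivity) (by push_cast; omega) acc
  · rw [PySem.List.foldl_append_eq_flatMap, List.nil_append]
    rw [show (PySem.List.enumerate lines 0) =
        (PySem.List.pyRange 0 lines.length 1).map
          (fun j => (j, PySem.List.pyGetD lines j (0, 0))) from
        PySem.List.enumerate_eq_map_pyRange lines (0, 0)]
    rw [List.flatMap_map]

-- ===== VERDICT (by name: the statement is the Claim_ definition above) =====
theorem find_parallel_lines_spec : Claim_equal_find_parallel_lines := by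
  intro lines _
  unfold Spec_find_parallel_lines
  rw [pv_A_eq_canon, pv_B_eq_canon]
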